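-- pv_equiv track=rewrite | github.com/ayagup/genai-patterns | 05_self_consistency.py | _approach_sequential
-- ===== SOURCE A (Python) =====
-- from typing import List, Dict, Tuple
--
-- def _approach_sequential(numbers: List[int], problem: str) -> Tuple[str, str]:
--     """Sequential calculation approach"""
--     reasoning = "Sequential approach:\n"
--     result = numbers[0]
--     reasoning += f"  Start with {result}\n"
--
--     for i, num in enumerate(numbers[1:], 1):
--         if "add" in problem.lower() or "plus" in problem.lower():
--             result += num
--             reasoning += f"  Add {num}: {result}\n"
--         elif "multiply" in problem.lower() or "times" in problem.lower():
--             result *= num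
--             reasoning += f"  Multiply by {num}: {result}\n"
--
--     return str(result), reasoning
-- ===== SOURCE B (Python) =====
-- def _approach_sequential(numbers, problem):
--     """Stateless formulation: pick the operation once; every partial result is
--     recomputed independently from its prefix (no running accumulator)."""
--     p = problem.lower()
--
--     def agg(prefix, unit, op):
--         r = unit
--         for x in prefix:
--             r = op(r, x)
--         return r
--
--     head = numbers[0]
--     if "add" in p or "plus" in p:
--         lines = "".join(
--             f"  Add {num}: {agg(numbers[:i + 2], 0, lambda a, b: a + b)}\n"
--             for i, num in enumerate(numbers[1:])
--         )
--         final = agg(numbers, 0, lambda a, b: a + b)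
--     elif "multiply" in p or "times" in p:
--         lines = "".join(
--             f"  Multiply by {num}: {agg(numbers[:i + 2], 1, lambda a, b: a * b)}\n"
--             for i, num in enumerate(numbers[1:])
--         )
--         final = agg(numbers, 1, lambda a, b: a * b)
--     else:
--         lines = ""
--         final = head
--     return str(final), f"Sequential approach:\n  Start with {head}\n" + lines
-- ===== Notes on version B (the rewrite author's own statement) =====
-- stated objective: alternative
-- what changed: B replaces A's single running-accumulator fold (which re-runs problem.lower() and the keyword substring tests for every element and mutates result/reasoning in step) with a stateless formulation: the operation is selected once, each per-line partial result is recomputed independently as a fold over its prefix numbers[:i+2], the final result is a fold over the whole list, and the lines are joined once.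
import Mathlib
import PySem

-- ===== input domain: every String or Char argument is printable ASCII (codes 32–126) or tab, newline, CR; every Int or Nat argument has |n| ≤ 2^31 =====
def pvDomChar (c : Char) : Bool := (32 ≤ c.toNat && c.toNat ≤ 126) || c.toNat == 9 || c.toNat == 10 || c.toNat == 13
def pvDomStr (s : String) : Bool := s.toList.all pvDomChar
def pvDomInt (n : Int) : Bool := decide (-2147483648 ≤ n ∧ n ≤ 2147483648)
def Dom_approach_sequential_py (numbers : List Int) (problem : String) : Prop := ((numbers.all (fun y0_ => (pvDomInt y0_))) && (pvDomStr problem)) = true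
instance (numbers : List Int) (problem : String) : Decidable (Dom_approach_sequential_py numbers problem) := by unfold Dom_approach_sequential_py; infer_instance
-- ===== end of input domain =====

-- B is stateless: the operation is chosen once and every partial result is recomputed
-- independently from its prefix, instead of A's running-accumulator loop. Same return value.

-- ===== PORT A =====
def approach_sequential_py (numbers : List Int) (problem : String) : String × String :=
  match PySem.List.pyGet? numbers 0 with
  | none => ("", "")   -- numbers[0] raises IndexError; excluded by Pre_
  | some r0 =>
    let reasoning := "Sequential approach:\n" ++ ("  Start with " ++ PySem.Int.toStr r0 ++ "\n")
    let fin := (PySem.List.slice numbers (some 1) none).foldl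
      (fun (st : Int × String) (num : Int) =>
        if PySem.Str.isIn "add" (PySem.Str.lower problem) || PySem.Str.isIn "plus" (PySem.Str.lower problem) then
          let r := st.1 + num
          (r, st.2 ++ ("  Add " ++ PySem.Int.toStr num ++ ": " ++ PySem.Int.toStr r ++ "\n"))
        else if PySem.Str.isIn "multiply" (PySem.Str.lower problem) || PySem.Str.isIn "times" (PySem.Str.lower problem) then
          let r := st.1 * num
          (r, st.2 ++ ("  Multiply by " ++ PySem.Int.toStr num ++ ": " ++ PySem.Int.toStr r ++ "\n"))
        else st)
      (r0, reasoning)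
    (PySem.Int.toStr fin.1, fin.2)

-- ===== PORT B =====
-- B's agg helper: a loop 'r = unit; for x in prefix: r = op(r, x)' = List.foldl
def pvAgg (pre : List Int) (unit : Int) (op : Int → Int → Int) : Int :=
  pre.foldl op unit

def approach_sequential_py_alt (numbers : List Int) (problem : String) : String × String :=
  match PySem.List.pyGet? numbers 0 with
  | none => ("", "")   -- numbers[0] raises IndexError in B too; excluded by Pre_
  | some head =>
    let p := PySem.Str.lower problem
    let (final, lines) :=
      if PySem.Str.isIn "add" p || PySem.Str.isIn "plus" p then
        (pvAgg numbers 0 (· + ·),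
         String.join ((PySem.List.enumerate (PySem.List.slice numbers (some 1) none) 0).map
           (fun inum => "  Add " ++ PySem.Int.toStr inum.2 ++ ": " ++
             PySem.Int.toStr (pvAgg (PySem.List.slice numbers none (some (inum.1 + 2))) 0 (· + ·)) ++ "\n")))
      else if PySem.Str.isIn "multiply" p || PySem.Str.isIn "times" p then
        (pvAgg numbers 1 (· * ·),
         String.join ((PySem.List.enumerate (PySem.List.slice numbers (some 1) none) 0).map
           (fun inum => "  Multiply by " ++ PySem.Int.toStr inum.2 ++ ": " ++
             PySem.Int.toStr (pvAgg (PySem.List.slice numbers none (some (inum.1 + 2))) 1 (· * ·)) ++ "\n")))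
      else (head, "")
    (PySem.Int.toStr final, "Sequential approach:\n" ++ "  Start with " ++ PySem.Int.toStr head ++ "\n" ++ lines)

-- ===== PRECONDITION & SPEC =====
-- Pre_ excludes only the empty list, on which numbers[0] raises IndexError in A (and in B).
def Pre_approach_sequential_py (numbers : List Int) (problem : String) : Prop := numbers ≠ []
instance (numbers : List Int) (problem : String) : Decidable (Pre_approach_sequential_py numbers problem) := by unfold Pre_approach_sequential_py; infer_instance
def pvWitness_approach_sequential_py : List Int × String := ([2, 3, 4], "add the numbers")

def Spec_approach_sequential_py (numbers : List Int) (problem : String) (out : String × String) : Prop := out = approach_sequential_py_alt numbers problem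
instance (numbers : List Int) (problem : String) (out : String × String) : Decidable (Spec_approach_sequential_py numbers problem out) := by unfold Spec_approach_sequential_py; infer_instance

-- ===== CLAIM (what is proved, stated in full; the proofs are below) =====
def Claim_equal_approach_sequential_py : Prop := ∀ (numbers : List Int) (problem : String), Dom_approach_sequential_py numbers problem → Pre_approach_sequential_py numbers problem → Spec_approach_sequential_py numbers problem (approach_sequential_py numbers problem)

-- ===== LEMMAS AND PROOFS =====

-- running totals after r, in scan form (characterisation of A's loop)
def pvScan (op : Int → Int → Int) (r : Int) : List Int → List Int
  | [] => []
  | n :: ns => op r n :: pvScan op (op r n) ns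

theorem pvFoldl_append : ∀ (l : List String) (a b : String), List.foldl (fun r s => r ++ s) (a ++ b) l = a ++ List.foldl (fun r s => r ++ s) b l := by
  intro l
  induction l with
  | nil => intro a b; rfl
  | cons x xs ih => intro a b; rw [List.foldl_cons, List.foldl_cons, String.append_assoc, ih]

theorem pvFoldl_join (l : List String) (a : String) : List.foldl (fun r s => r ++ s) a l = a ++ String.join l := by
  have h : a = a ++ "" := by simp
  conv_lhs => rw [h]
  rw [pvFoldl_append]
  congr 1

theorem pvJoin_cons (a : String) (l : List String) : String.join (a :: l) = a ++ String.join l := by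
  have h : String.join (a :: l) = List.foldl (fun r s => r ++ s) ("" ++ a) l := rfl
  rw [h, show ("" : String) ++ a = a by simp, pvFoldl_join]

-- A's loop with a constant-true branch equals scan totals + joined formatted lines
theorem pvFoldA_eq (op : Int → Int → Int) (fmt : Int → Int → String) :
    ∀ (t : List Int) (r : Int) (s : String),
      t.foldl (fun (st : Int × String) num => (op st.1 num, st.2 ++ fmt num (op st.1 num))) (r, s)
      = ((pvScan op r t).getLastD r,
         s ++ String.join ((t.zip (pvScan op r t)).map (fun nt => fmt nt.1 nt.2))) := by
  intro t
  induction t with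
  | nil => intro r s; simp [pvScan, String.join]
  | cons n ns ih =>
    intro r s
    simp only [List.foldl_cons, pvScan, List.zip_cons_cons, List.map_cons, List.getLastD_cons,
      pvJoin_cons]
    rw [ih (op r n) (s ++ fmt n (op r n))]
    simp [String.append_assoc]

-- A's loop with both branches false is the identity
theorem pvFoldA_id (f : Int × String → Int → Int × String) (hf : ∀ st num, f st num = st) :
    ∀ (t : List Int) (st : Int × String), t.foldl f st = st := by
  intro t
  induction t with
  | nil => intro st; rfl
  | cons n ns ih => intro st; rw [List.foldl_cons, hf]; exact ih st

-- the last scan value is the left fold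
theorem pvScan_last (op : Int → Int → Int) :
    ∀ (t : List Int) (r : Int), (pvScan op r t).getLastD r = t.foldl op r := by
  intro t
  induction t with
  | nil => intro r; rfl
  | cons n ns ih => intro r; simp only [pvScan, List.getLastD_cons, List.foldl_cons]; exact ih (op r n)

-- A's zip-with-scan lines equal B's enumerate-with-prefix-fold lines
theorem pvZip_enum (op : Int → Int → Int) (unit : Int) (fmt : Int → Int → String) :
    ∀ (rest full : List Int) (s : Nat) (r : Int),
      (full.take (s + 1)).foldl op unit = r →
      full.drop (s + 1) = rest →
      (rest.zip (pvScan op r rest)).map (fun nt => fmt nt.1 nt.2)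
      = (PySem.List.enumerate rest (s : Int)).map (fun inum =>
          fmt inum.2 ((PySem.List.slice full none (some (inum.1 + 2))).foldl op unit)) := by
  intro rest
  induction rest with
  | nil => intro full s r _ _; simp [PySem.List.enumerate_nil]
  | cons n ns ih =>
    intro full s r hr hd
    have htake : full.take (s + 2) = full.take (s + 1) ++ [n] := by
      have : full.take (s + 1 + 1) = full.take (s + 1) ++ (full.drop (s + 1)).take 1 := List.take_add ..
      simpa [hd] using this
    have hs2 : PySem.List.slice full none (some ((s : Int) + 2)) = full.take (s + 2) := by
      rw [show ((s : Int) + 2) = ((s + 2 : Nat) : Int) by push_cast; ring,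
        PySem.List.slice_to_natCast]
    have hdrop : full.drop (s + 1 + 1) = ns := by
      have h2 := congrArg List.tail hd
      simp only [List.tail_cons, List.tail_drop] at h2
      simpa using h2
    simp only [pvScan, List.zip_cons_cons, List.map_cons, PySem.List.enumerate_cons]
    congr 1
    · rw [hs2, htake, List.foldl_append, hr]; rfl
    · rw [ih full (s + 1) (op r n) (by rw [htake, List.foldl_append, hr]; rfl) hdrop]
      norm_cast
theorem pvMain (numbers : List Int) (problem : String)
    (hpre : Pre_approach_sequential_py numbers problem) :
    approach_sequential_py numbers problem = approach_sequential_py_alt numbers problem := by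
  match numbers with
  | [] => exact absurd rfl hpre
  | h :: t =>
    unfold approach_sequential_py approach_sequential_py_alt pvAgg
    simp only [PySem.List.pyGet?_zero_cons, PySem.List.slice_from_one, List.tail_cons]
    by_cases hadd : (PySem.Str.isIn "add" (PySem.Str.lower problem)
        || PySem.Str.isIn "plus" (PySem.Str.lower problem)) = true
    · simp only [hadd, if_true]
      rw [pvFoldA_eq (· + ·) (fun num r => "  Add " ++ PySem.Int.toStr num ++ ": " ++ PySem.Int.toStr r ++ "\n") t h]
      rw [pvZip_enum (· + ·) 0 (fun num r => "  Add " ++ PySem.Int.toStr num ++ ": " ++ PySem.Int.toStr r ++ "\n")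
        t (h :: t) 0 h (by simp) (by simp)]
      rw [pvScan_last, List.foldl_cons, zero_add]
      simp [String.append_assoc]
      rw [← String.append_assoc, show ("Sequential approach:\n" ++ "  Start with " : String) = "Sequential approach:\n  Start with " from rfl]
    · simp only [hadd, if_false, Bool.false_eq_true]
      by_cases hmul : (PySem.Str.isIn "multiply" (PySem.Str.lower problem)
          || PySem.Str.isIn "times" (PySem.Str.lower problem)) = true
      · simp only [hmul, if_true]
        rw [pvFoldA_eq (· * ·) (fun num r => "  Multiply by " ++ PySem.Int.toStr num ++ ": " ++ PySem.Int.toStr r ++ "\n") t h]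
        rw [pvZip_enum (· * ·) 1 (fun num r => "  Multiply by " ++ PySem.Int.toStr num ++ ": " ++ PySem.Int.toStr r ++ "\n")
          t (h :: t) 0 h (by simp) (by simp)]
        rw [pvScan_last, List.foldl_cons, one_mul]
        simp [String.append_assoc]
        rw [← String.append_assoc, show ("Sequential approach:\n" ++ "  Start with " : String) = "Sequential approach:\n  Start with " from rfl]
      · simp only [hmul, if_false, Bool.false_eq_true]
        rw [pvFoldA_id _ (fun st num => rfl) t]
        simp [← String.append_assoc]

-- ===== VERDICT (by name: the statement is the Claim_ definition above) =====
theorem approach_sequential_py_spec : Claim_equal_approach_sequential_py := by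
  intro numbers problem _ hpre
  exact pvMain numbers problem hpre
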